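-- pv_equiv track=rewrite | github.com/a108960LeticiaRodrigues/ATP2024 | TP7/TPC.py | maxPeriodoCalor
-- ===== SOURCE A (Python) =====
-- def maxPeriodoCalor(tabMeteo, p):
--     consec_local = 0
--     consec_max = 0
--
--     for data,min,max,prec in tabMeteo:
--         if prec < p:
--             consec_local += 1
--
--         else:
--             if consec_local > consec_max:
--                 consec_max = consec_local
--             consec_local = 0
--
--     if consec_local > consec_max:
--         consec_max = consec_local
--
--     return consec_max
-- ===== SOURCE B (Python) =====
-- def maxPeriodoCalor(tabMeteo, p):
--     # Decompose into runs: collect the lengths of maximal consecutive blocks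
--     # of rows with prec < p, then take the maximum (0 if there is none).
--     lens = []
--     i, n = 0, len(tabMeteo)
--     while i < n:
--         if tabMeteo[i][3] < p:
--             j = i + 1
--             while j < n and tabMeteo[j][3] < p:
--                 j += 1
--             lens.append(j - i)
--             i = j
--         else:
--             i += 1
--     return max(lens, default=0)
-- ===== Notes on version B (the rewrite author's own statement) =====
-- stated objective: alternative
-- what changed: B replaces A's running local/max accumulator pair with an explicit grouping decomposition: it scans the table into the list of lengths of maximal runs with prec < p and returns the maximum of that list (default 0).
import Mathlib
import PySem

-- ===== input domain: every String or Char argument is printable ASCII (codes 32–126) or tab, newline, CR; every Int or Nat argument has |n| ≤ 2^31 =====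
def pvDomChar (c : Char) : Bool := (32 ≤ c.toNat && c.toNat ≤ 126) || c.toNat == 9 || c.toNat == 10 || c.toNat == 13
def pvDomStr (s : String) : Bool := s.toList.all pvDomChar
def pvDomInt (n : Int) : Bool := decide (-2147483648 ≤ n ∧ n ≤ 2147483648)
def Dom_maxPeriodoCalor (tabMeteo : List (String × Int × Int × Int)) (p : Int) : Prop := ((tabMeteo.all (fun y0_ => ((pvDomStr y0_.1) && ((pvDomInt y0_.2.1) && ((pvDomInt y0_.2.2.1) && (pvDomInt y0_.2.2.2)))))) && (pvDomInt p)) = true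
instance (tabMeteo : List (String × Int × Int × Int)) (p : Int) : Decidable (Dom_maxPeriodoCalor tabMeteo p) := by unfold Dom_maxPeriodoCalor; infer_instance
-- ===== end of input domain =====

-- B replaces A's running local/max accumulator with an explicit grouping decomposition
-- (collect lengths of maximal runs with prec < p, then take the max, default 0); same cost.

-- ===== PORT A =====
-- running pair (consec_local, consec_max), final flush after the loop
def maxPeriodoCalor (tabMeteo : List (String × Int × Int × Int)) (p : Int) : Int :=
  let s := tabMeteo.foldl
    (fun (st : Int × Int) row =>
      if row.2.2.2 < p then (st.1 + 1, st.2)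
      else (0, if st.1 > st.2 then st.1 else st.2))
    (0, 0)
  if s.1 > s.2 then s.1 else s.2

-- ===== PORT B =====
-- lengths of the maximal consecutive runs of rows with prec < p
-- (the inner `while j < n and ...: j += 1` of Source B is the takeWhile over the tail; j - i = 1 + its length)
def pvRunLens (p : Int) : List (String × Int × Int × Int) → List Int
  | [] => []
  | r :: rest =>
    if r.2.2.2 < p then
      let t := rest.takeWhile (fun x => decide (x.2.2.2 < p))
      (1 + (t.length : Int)) :: pvRunLens p (rest.drop t.length)
    else pvRunLens p rest
termination_by l => l.length
decreasing_by
  all_goals (simp; try omega)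

def maxPeriodoCalor_alt (tabMeteo : List (String × Int × Int × Int)) (p : Int) : Int :=
  (PySem.List.max? (pvRunLens p tabMeteo) (fun x => x)).getD 0

-- ===== PRECONDITION & SPEC =====
def Spec_maxPeriodoCalor (tabMeteo : List (String × Int × Int × Int)) (p : Int) (out : Int) : Prop := out = maxPeriodoCalor_alt tabMeteo p
instance (tabMeteo : List (String × Int × Int × Int)) (p : Int) (out : Int) : Decidable (Spec_maxPeriodoCalor tabMeteo p out) := by unfold Spec_maxPeriodoCalor; infer_instance

-- ===== CLAIM (what is proved, stated in full; the proofs are below) =====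
def Claim_equal_maxPeriodoCalor : Prop := ∀ (tabMeteo : List (String × Int × Int × Int)) (p : Int), Dom_maxPeriodoCalor tabMeteo p → Spec_maxPeriodoCalor tabMeteo p (maxPeriodoCalor tabMeteo p)

-- ===== LEMMAS AND PROOFS =====

-- semantic middle-man: best run, with the current run already `loc` long
def pvG (p : Int) : List (String × Int × Int × Int) → Int → Int
  | [], loc => loc
  | r :: rest, loc =>
    if r.2.2.2 < p then pvG p rest (loc + 1) else max loc (pvG p rest 0)

theorem pvG_nonneg (p : Int) : ∀ (tab : List (String × Int × Int × Int)) (loc : Int),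
    0 ≤ loc → 0 ≤ pvG p tab loc := by
  intro tab
  induction tab with
  | nil => intro loc h; simpa [pvG] using h
  | cons r rest ih =>
    intro loc h
    simp only [pvG]
    split
    · exact ih _ (by omega)
    · exact le_trans h (le_max_left _ _)

theorem loopA (p : Int) : ∀ (tab : List (String × Int × Int × Int)) (loc mx : Int),
    (let s := tab.foldl
      (fun (st : Int × Int) row =>
        if row.2.2.2 < p then (st.1 + 1, st.2)
        else (0, if st.1 > st.2 then st.1 else st.2)) (loc, mx)
     ; if s.1 > s.2 then s.1 else s.2) = max mx (pvG p tab loc) := by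
  intro tab
  induction tab with
  | nil =>
    intro loc mx
    simp only [List.foldl_nil, pvG]
    split <;> omega
  | cons r rest ih =>
    intro loc mx
    simp only [List.foldl_cons, pvG]
    by_cases h : r.2.2.2 < p
    · simp only [if_pos h]
      exact ih (loc + 1) mx
    · simp only [if_neg h]
      rw [ih 0 _]
      split <;> omega

theorem pvG_prefix (p : Int) : ∀ (t rest : List (String × Int × Int × Int)) (loc : Int),
    (∀ x ∈ t, x.2.2.2 < p) → pvG p (t ++ rest) loc = pvG p rest (loc + t.length) := by
  intro t
  induction t with
  | nil => intro rest loc _; simp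
  | cons a t ih =>
    intro rest loc h
    have ha : a.2.2.2 < p := h a (by simp)
    simp only [List.cons_append, pvG, if_pos ha]
    rw [ih rest (loc + 1) (fun x hx => h x (by simp [hx]))]
    congr 1
    simp
    omega

theorem drop_len_takeWhile {α : Type} (q : α → Bool) :
    ∀ (l : List α), l.drop (l.takeWhile q).length = l.dropWhile q := by
  intro l
  induction l with
  | nil => simp
  | cons a l ih =>
    by_cases h : q a
    · simp [h, ih]
    · simp [h]

theorem dropWhile_head_false {α : Type} (q : α → Bool) :
    ∀ (l : List α) (x : α) (xs : List α), l.dropWhile q = x :: xs → q x = false := by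
  intro l
  induction l with
  | nil => intro x xs h; simp at h
  | cons a l ih =>
    intro x xs h
    by_cases ha : q a
    · exact ih x xs (by simpa [List.dropWhile_cons, ha] using h)
    · simp [ha] at h
      rw [← h.1]
      simpa using ha

theorem foldl_max_shift : ∀ (l : List Int) (a b : Int),
    l.foldl max (max a b) = max a (l.foldl max b) := by
  intro l
  induction l with
  | nil => intro a b; simp
  | cons x l ih =>
    intro a b
    simp only [List.foldl_cons]
    rw [max_assoc, ih]

theorem pvG_eq_runs (p : Int) : ∀ (n : Nat) (tab : List (String × Int × Int × Int)),
    tab.length ≤ n →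
    pvG p tab 0 = (PySem.List.max? (pvRunLens p tab) (fun x => x)).getD 0 := by
  intro n
  induction n with
  | zero =>
    intro tab h
    have : tab = [] := List.eq_nil_of_length_eq_zero (by omega)
    subst this
    simp [pvG, pvRunLens, PySem.List.max?]
  | succ n ih =>
    intro tab hlen
    match tab with
    | [] => simp [pvG, pvRunLens, PySem.List.max?]
    | r :: rest =>
      simp only [List.length_cons] at hlen
      by_cases h : r.2.2.2 < p
      · -- run of positive length starts here
        set q : (String × Int × Int × Int) → Bool := fun x => decide (x.2.2.2 < p) with hq
        have hsplit : rest.takeWhile q ++ rest.dropWhile q = rest := List.takeWhile_append_dropWhile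
        have hdrop : rest.drop (rest.takeWhile q).length = rest.dropWhile q := drop_len_takeWhile q rest
        have hGcons : pvG p (r :: rest) 0 = pvG p (rest.dropWhile q) (1 + (rest.takeWhile q).length) := by
          simp only [pvG, if_pos h]
          conv_lhs => rw [← hsplit]
          rw [pvG_prefix p _ _ _ (fun x hx => by
            have := List.mem_takeWhile_imp hx
            simpa [hq] using this)]
          norm_num
        have hRcons : pvRunLens p (r :: rest)
            = (1 + ((rest.takeWhile q).length : Int)) :: pvRunLens p (rest.dropWhile q) := by
          rw [pvRunLens]
          simp only [if_pos h, ← hq, hdrop]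
        rw [hGcons, hRcons]
        set tl : Int := ((rest.takeWhile q).length : Int) with htl
        have htl0 : 0 ≤ tl := by positivity
        rw [PySem.List.max?_id_cons]
        simp only [Option.getD_some]
        match hd : rest.dropWhile q with
        | [] => simp [pvG, pvRunLens]
        | x :: rs =>
          have hx : q x = false := dropWhile_head_false q rest x rs hd
          have hxp : ¬ x.2.2.2 < p := by simpa [hq] using hx
          have hlen2 : rs.length ≤ n := by
            have h1 : (rest.dropWhile q).length ≤ rest.length := List.length_dropWhile_le q rest
            rw [hd] at h1
            simp at h1
            omega
          have hG : pvG p (x :: rs) (1 + tl) = max (1 + tl) (pvG p rs 0) := by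
            simp [pvG, hxp]
          have hR : pvRunLens p (x :: rs) = pvRunLens p rs := by
            rw [pvRunLens]; simp [hxp]
          rw [hG, hR, ih rs hlen2]
          match hr : pvRunLens p rs with
          | [] => simp [PySem.List.max?]; omega
          | y :: ys =>
            rw [PySem.List.max?_id_cons]
            simp only [Option.getD_some, List.foldl_cons]
            rw [← foldl_max_shift]
      · -- head not in a run: both sides skip it
        have hG : pvG p (r :: rest) 0 = pvG p rest 0 := by
          have := pvG_nonneg p rest 0 le_rfl
          simp [pvG, h]
          omega
        have hR : pvRunLens p (r :: rest) = pvRunLens p rest := by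
          rw [pvRunLens]; simp [h]
        rw [hG, hR]
        exact ih rest (by omega)

-- ===== VERDICT (by name: the statement is the Claim_ definition above) =====
theorem maxPeriodoCalor_spec : Claim_equal_maxPeriodoCalor := by
  intro tab p _
  unfold Spec_maxPeriodoCalor maxPeriodoCalor maxPeriodoCalor_alt
  rw [loopA p tab 0 0, ← pvG_eq_runs p tab.length tab le_rfl]
  have := pvG_nonneg p tab 0 le_rfl
  omega
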